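-- pv_equiv track=rewrite | github.com/kazamazza/pokerai | ml/etl/rangenet/report_preflop_coverage_auditor.py | supports_4bet_pot
-- ===== SOURCE A (Python) =====
-- from typing import Dict, List, Set, Tuple, Optional
--
-- RAISEY_RAW = {"Min", "AI", "3sb"}  # vendor "raise-ish" tokens
--
-- FOLD_RAW   = {"Fold"}
--
-- def is_raise_raw(a: Optional[str]) -> bool:
--     if not a: return False
--     return a in RAISEY_RAW or a.endswith("%")  # e.g. "60%"
--
-- def is_fold_raw(a: Optional[str]) -> bool:
--     return (a or "") in FOLD_RAW
--
-- def first_non_fold_raise(seq: List[dict]) -> Tuple[Optional[str], Optional[str], int]: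
--     """
--     Return (pos, action, index) of first non-fold *raise-ish* action in seq, else (None,None,-1).
--     """
--     for i, e in enumerate(seq):
--         pos = e.get("pos")
--         act = e.get("action")
--         if is_fold_raw(act):
--             continue
--         if is_raise_raw(act):
--             return pos, act, i
--     return None, None, -1
--
-- def supports_4bet_pot(seq: List[dict], opener: str, defender: str) -> bool:
--     """
--     Heuristic: opener raises, defender raises (3bet), opener raises again (4bet) before defender acts again.
--     """
--     open_pos, _, open_idx = first_non_fold_raise(seq)
--     if open_pos != opener:
--         return False
--
--     # find defender first action after open_idx
--     def_first_idx = None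
--     for i in range(open_idx + 1, len(seq)):
--         e = seq[i]
--         if e.get("pos") == defender:
--             def_first_idx = i
--             break
--     if def_first_idx is None:
--         return False
--     if not is_raise_raw(seq[def_first_idx].get("action")):
--         return False  # not a 3bet
--
--     # opener raises again (4bet) before defender acts second time
--     for j in range(def_first_idx + 1, len(seq)):
--         e = seq[j]
--         if e.get("pos") == opener:
--             return is_raise_raw(e.get("action"))
--         if e.get("pos") == defender:
--             break
--     return False
-- ===== SOURCE B (Python) =====
-- from typing import List, Optional
--
-- RAISEY_RAW = {"Min", "AI", "3sb"}  # vendor "raise-ish" tokens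
--
-- def is_raise_raw(a: Optional[str]) -> bool:
--     if not a: return False
--     return a in RAISEY_RAW or a.endswith("%")  # e.g. "60%"
--
-- def supports_4bet_pot(seq: List[dict], opener: str, defender: str) -> bool:
--     """Single forward pass with a 3-state machine: 0 = awaiting the first
--     raise-ish action, 1 = opened, awaiting defender's next entry, 2 = 3bet,
--     awaiting opener (4bet) or defender."""
--     state = 0
--     for e in seq:
--         pos = e.get("pos")
--         act = e.get("action")
--         if state == 0:
--             if is_raise_raw(act):
--                 if pos != opener:
--                     return False
--                 state = 1
--         elif state == 1:
--             if pos == defender: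
--                 if not is_raise_raw(act):
--                     return False
--                 state = 2
--         else:
--             if pos == opener:
--                 return is_raise_raw(act)
--             if pos == defender:
--                 return False
--     return False
-- ===== Notes on version B (the rewrite author's own statement) =====
-- stated objective: simpler
-- what changed: Replaced A's three separate index-tracking scans (first_non_fold_raise helper, defender-search loop, 4bet loop) by one forward pass over seq driven by a 3-state machine.
import Mathlib
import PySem

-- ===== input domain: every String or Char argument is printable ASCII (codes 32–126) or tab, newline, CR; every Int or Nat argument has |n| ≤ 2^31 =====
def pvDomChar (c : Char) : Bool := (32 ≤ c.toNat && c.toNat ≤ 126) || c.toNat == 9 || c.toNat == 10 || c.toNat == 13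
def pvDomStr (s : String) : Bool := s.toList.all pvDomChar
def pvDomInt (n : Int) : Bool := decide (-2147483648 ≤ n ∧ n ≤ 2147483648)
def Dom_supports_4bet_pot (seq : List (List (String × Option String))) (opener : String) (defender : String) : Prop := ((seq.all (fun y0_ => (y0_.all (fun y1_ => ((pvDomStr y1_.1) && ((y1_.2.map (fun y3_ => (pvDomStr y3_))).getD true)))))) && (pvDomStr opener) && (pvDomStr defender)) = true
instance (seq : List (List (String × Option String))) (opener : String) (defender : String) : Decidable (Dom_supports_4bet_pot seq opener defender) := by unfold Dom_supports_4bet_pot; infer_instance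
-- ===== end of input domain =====

-- B replaces A's three index-tracking scans by one forward pass with a 3-state machine (simpler, same O(n) cost).

-- ===== PORT A =====
-- e.get("pos") / e.get("action") on the entry dict
def pyPos (e : List (String × Option String)) : Option String :=
  PySem.Dict.getD (PySem.Dict.mk e) "pos" none
def pyAct (e : List (String × Option String)) : Option String :=
  PySem.Dict.getD (PySem.Dict.mk e) "action" none

def is_raise_raw (a : Option String) : Bool :=
  match a with
  | none => false
  | some s => if s == "" then false
              else (s == "Min" || s == "AI" || s == "3sb" || PySem.Str.endswith s "%")

def is_fold_raw (a : Option String) : Bool := (a.getD "") == "Fold"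

-- the enumerate loop of first_non_fold_raise (i is the running index)
def fnfrAux (seq : List (List (String × Option String))) (i : Int) :
    Option String × Option String × Int :=
  match seq with
  | [] => (none, none, -1)
  | e :: rest =>
    if is_fold_raw (pyAct e) then fnfrAux rest (i + 1)
    else if is_raise_raw (pyAct e) then (pyPos e, pyAct e, i)
    else fnfrAux rest (i + 1)

def first_non_fold_raise (seq : List (List (String × Option String))) :
    Option String × Option String × Int := fnfrAux seq 0

-- for i in range(start, len(seq)): … find defender's first index, else None
def findDefIdx (seq : List (List (String × Option String))) (defender : String) (i : Int) :
    Option Int :=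
  if _h : i < (seq.length : Int) then
    match PySem.List.pyGet? seq i with
    | some e => if pyPos e == some defender then some i else findDefIdx seq defender (i + 1)
    | none => none   -- unreachable: the loop index stays in range
  else none
termination_by ((seq.length : Int) - i).toNat
decreasing_by omega

-- for j in range(start, len(seq)): … the 4bet loop (break = return False)
def fourBetLoop (seq : List (List (String × Option String))) (opener defender : String)
    (j : Int) : Bool :=
  if _h : j < (seq.length : Int) then
    match PySem.List.pyGet? seq j with
    | some e =>
      if pyPos e == some opener then is_raise_raw (pyAct e)
      else if pyPos e == some defender then false
      else fourBetLoop seq opener defender (j + 1)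
    | none => false   -- unreachable: the loop index stays in range
  else false
termination_by ((seq.length : Int) - j).toNat
decreasing_by omega

def supports_4bet_pot (seq : List (List (String × Option String))) (opener : String) (defender : String) : Bool :=
  let r := first_non_fold_raise seq
  if !(r.1 == some opener) then false
  else
    match findDefIdx seq defender (r.2.2 + 1) with
    | none => false
    | some di =>
      match PySem.List.pyGet? seq di with
      | none => false   -- unreachable: di is a found in-range index
      | some e =>
        if !is_raise_raw (pyAct e) then false
        else fourBetLoop seq opener defender (di + 1)

-- ===== PORT B =====
def is_raise_raw_alt (a : Option String) : Bool :=
  match a with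
  | none => false
  | some s => if s == "" then false
              else (s == "Min" || s == "AI" || s == "3sb" || PySem.Str.endswith s "%")

-- the single forward pass; state 0/1/2 (Python's if state==0 / elif state==1 / else chain)
def altLoop (opener defender : String) : Nat → List (List (String × Option String)) → Bool
  | _, [] => false
  | 0, e :: rest =>
    let pos := PySem.Dict.getD (PySem.Dict.mk e) "pos" none
    let act := PySem.Dict.getD (PySem.Dict.mk e) "action" none
    if is_raise_raw_alt act then
      if !(pos == some opener) then false else altLoop opener defender 1 rest
    else altLoop opener defender 0 rest
  | 1, e :: rest =>
    let pos := PySem.Dict.getD (PySem.Dict.mk e) "pos" none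
    let act := PySem.Dict.getD (PySem.Dict.mk e) "action" none
    if pos == some defender then
      if !is_raise_raw_alt act then false else altLoop opener defender 2 rest
    else altLoop opener defender 1 rest
  | _ + 2, e :: rest =>
    let pos := PySem.Dict.getD (PySem.Dict.mk e) "pos" none
    let act := PySem.Dict.getD (PySem.Dict.mk e) "action" none
    if pos == some opener then is_raise_raw_alt act
    else if pos == some defender then false
    else altLoop opener defender 2 rest

def supports_4bet_pot_alt (seq : List (List (String × Option String))) (opener : String) (defender : String) : Bool :=
  altLoop opener defender 0 seq

-- ===== PRECONDITION & SPEC =====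
def Spec_supports_4bet_pot (seq : List (List (String × Option String))) (opener : String) (defender : String) (out : Bool) : Prop := out = supports_4bet_pot_alt seq opener defender
instance (seq : List (List (String × Option String))) (opener : String) (defender : String) (out : Bool) : Decidable (Spec_supports_4bet_pot seq opener defender out) := by unfold Spec_supports_4bet_pot; infer_instance

-- ===== CLAIM (what is proved, stated in full; the proofs are below) =====
def Claim_equal_supports_4bet_pot : Prop := ∀ (seq : List (List (String × Option String))) (opener : String) (defender : String), Dom_supports_4bet_pot seq opener defender → Spec_supports_4bet_pot seq opener defender (supports_4bet_pot seq opener defender)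

-- ===== LEMMAS AND PROOFS =====

theorem raise_alt_eq (a : Option String) : is_raise_raw_alt a = is_raise_raw a := rfl

theorem fold_not_raise (a : Option String) (h : is_fold_raw a = true) :
    is_raise_raw a = false := by
  cases a with
  | none => simp [is_fold_raw] at h
  | some s =>
    have : s = "Fold" := by simpa [is_fold_raw] using h
    subst this
    decide

theorem pyPos_fold (e : List (String × Option String)) :
    PySem.Dict.getD (PySem.Dict.mk e) "pos" none = pyPos e := rfl

theorem pyAct_fold (e : List (String × Option String)) :
    PySem.Dict.getD (PySem.Dict.mk e) "action" none = pyAct e := rfl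

theorem cast_succ (n : Nat) : ((n : Int) + 1) = ((n + 1 : Nat) : Int) := by push_cast; ring

theorem lemma_state2 (seq : List (List (String × Option String))) (opener defender : String) :
    ∀ n : Nat, fourBetLoop seq opener defender (n : Int) = altLoop opener defender 2 (seq.drop n) := by
  intro n
  induction hk : seq.length - n using Nat.strong_induction_on generalizing n with
  | _ k ih =>
    by_cases hlt : n < seq.length
    · rw [List.drop_eq_getElem_cons hlt]
      rw [fourBetLoop, dif_pos (by exact_mod_cast hlt)]
      rw [PySem.List.pyGet?_natCast, List.getElem?_eq_getElem hlt]
      have hrec : fourBetLoop seq opener defender ((n : Int) + 1)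
          = altLoop opener defender 2 (seq.drop (n + 1)) := by
        rw [cast_succ]; exact ih (seq.length - (n + 1)) (by omega) (n + 1) rfl
      rw [hrec]
      simp only [altLoop, raise_alt_eq, pyPos, pyAct]
      rfl
    · rw [fourBetLoop, dif_neg (by exact_mod_cast hlt)]
      rw [List.drop_eq_nil_of_le (by omega)]
      rfl

-- the composite "defender search + 3bet test + 4bet loop" tail of A's main, vs state 1
theorem lemma_state1 (seq : List (List (String × Option String))) (opener defender : String) :
    ∀ n : Nat,
      (match findDefIdx seq defender (n : Int) with
       | none => false
       | some di =>
         match PySem.List.pyGet? seq di with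
         | none => false
         | some e =>
           if !is_raise_raw (pyAct e) then false
           else fourBetLoop seq opener defender (di + 1))
      = altLoop opener defender 1 (seq.drop n) := by
  intro n
  induction hk : seq.length - n using Nat.strong_induction_on generalizing n with
  | _ k ih =>
    by_cases hlt : n < seq.length
    · rw [List.drop_eq_getElem_cons hlt]
      rw [findDefIdx, dif_pos (by exact_mod_cast hlt)]
      rw [PySem.List.pyGet?_natCast, List.getElem?_eq_getElem hlt]
      simp only [altLoop, raise_alt_eq]
      by_cases hd : (PySem.Dict.getD (PySem.Dict.mk seq[n]) "pos" none == some defender) = true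
      · rw [if_pos (by simpa [pyPos] using hd), if_pos hd]
        dsimp only
        rw [PySem.List.pyGet?_natCast, List.getElem?_eq_getElem hlt]
        dsimp only
        by_cases hr : is_raise_raw (PySem.Dict.getD (PySem.Dict.mk seq[n]) "action" none) = true
        · rw [if_neg (by simp [pyAct, hr]), if_neg (by simp [hr])]
          rw [cast_succ, lemma_state2]
        · simp [pyAct, hr]
      · rw [if_neg (by simpa [pyPos] using hd), if_neg hd]
        rw [cast_succ]
        exact ih (seq.length - (n + 1)) (by omega) (n + 1) rfl
    · rw [findDefIdx, dif_neg (by exact_mod_cast hlt)]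
      rw [List.drop_eq_nil_of_le (by omega)]
      rfl

-- A's whole body, started at suffix n, vs state 0
theorem lemma_state0 (seq0 : List (List (String × Option String))) (opener defender : String) :
    ∀ n : Nat,
      (let r := fnfrAux (seq0.drop n) (n : Int);
       if !(r.1 == some opener) then false
       else
         match findDefIdx seq0 defender (r.2.2 + 1) with
         | none => false
         | some di =>
           match PySem.List.pyGet? seq0 di with
           | none => false
           | some e =>
             if !is_raise_raw (pyAct e) then false
             else fourBetLoop seq0 opener defender (di + 1))
      = altLoop opener defender 0 (seq0.drop n) := by
  intro n
  induction hk : seq0.length - n using Nat.strong_induction_on generalizing n with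
  | _ k ih =>
    by_cases hlt : n < seq0.length
    · rw [List.drop_eq_getElem_cons hlt]
      simp only [fnfrAux, altLoop, raise_alt_eq, pyPos_fold, pyAct_fold]
      by_cases hf : is_fold_raw (pyAct seq0[n]) = true
      · rw [if_pos hf]
        simp only [fold_not_raise _ hf, if_neg (by decide : ¬ (false = true))]
        rw [cast_succ]
        have h2 := ih (seq0.length - (n + 1)) (by omega) (n + 1) rfl
        simpa only [List.drop_eq_getElem_cons hlt] using h2
      · rw [if_neg hf]
        by_cases hr : is_raise_raw (pyAct seq0[n]) = true
        · rw [if_pos hr, if_pos hr]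
          by_cases ho : (pyPos seq0[n] == some opener) = true
          · simp only [ho, Bool.not_true, if_neg (by decide : ¬ (false = true))]
            rw [cast_succ, lemma_state1]
          · simp [ho]
        · rw [if_neg hr, if_neg hr]
          rw [cast_succ]
          have h2 := ih (seq0.length - (n + 1)) (by omega) (n + 1) rfl
          simpa only [List.drop_eq_getElem_cons hlt] using h2
    · rw [List.drop_eq_nil_of_le (by omega)]
      simp [fnfrAux, altLoop]

-- ===== VERDICT (by name: the statement is the Claim_ definition above) =====
theorem supports_4bet_pot_spec : Claim_equal_supports_4bet_pot := by
  intro seq opener defender _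
  unfold Spec_supports_4bet_pot supports_4bet_pot supports_4bet_pot_alt first_non_fold_raise
  have h := lemma_state0 seq opener defender 0
  simpa using h
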